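-- pv_equiv track=rewrite | github.com/DragunWF/Competitive-Programming | CodeWars/python/6_kyu/anagram_difference.py | anagram_difference
-- ===== SOURCE A (Python) =====
-- from collections import Counter
--
-- def anagram_difference(w1: str, w2: str) -> str:
--     total = 0
--     w1_counter = Counter(w1)
--     w2_counter = Counter(w2)
--     total += get_letter_difference(w1_counter, w2_counter)
--     total += get_letter_difference(w2_counter, w1_counter)
--     for key in w1_counter:
--         if key in w2_counter:
--             total += abs(w1_counter[key] - w2_counter[key])
--     return total
--
-- def get_letter_difference(w1_counter: Counter, w2_counter: Counter) -> int:
--     total = 0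
--     for key in w1_counter:
--         if not key in w2_counter:
--             total += w1_counter[key]
--     return total
-- ===== SOURCE B (Python) =====
-- def anagram_difference(w1: str, w2: str) -> str:
--     a = sorted(w1)
--     b = sorted(w2)
--     i = j = matched = 0
--     while i < len(a) and j < len(b):
--         if a[i] == b[j]:
--             matched += 1
--             i += 1
--             j += 1
--         elif a[i] < b[j]:
--             i += 1
--         else:
--             j += 1
--     return len(a) + len(b) - 2 * matched
-- ===== Notes on version B (the rewrite author's own statement) =====
-- stated objective: alternative
-- what changed: Replaces Counter hash-counting with per-key loops by sorting both words and running a two-pointer merge that counts matched letters, returning len(w1)+len(w2)-2*matched; no counters or per-key scans at all.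
import Mathlib
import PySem

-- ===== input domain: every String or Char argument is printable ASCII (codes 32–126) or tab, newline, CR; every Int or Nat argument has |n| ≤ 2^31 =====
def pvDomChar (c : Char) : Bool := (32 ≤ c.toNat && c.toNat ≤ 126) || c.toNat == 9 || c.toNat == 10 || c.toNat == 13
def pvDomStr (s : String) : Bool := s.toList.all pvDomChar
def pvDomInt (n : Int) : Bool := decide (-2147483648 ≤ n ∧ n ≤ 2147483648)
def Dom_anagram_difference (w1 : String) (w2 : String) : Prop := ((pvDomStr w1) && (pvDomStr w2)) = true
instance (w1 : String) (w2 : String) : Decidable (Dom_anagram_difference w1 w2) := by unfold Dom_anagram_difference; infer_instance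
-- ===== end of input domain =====

-- B drops the Counter per-key bookkeeping entirely: it sorts both words and counts matched
-- letters with a two-pointer merge, returning len(w1)+len(w2)-2*matched; alternative algorithm,
-- same result.

-- ===== PORT A =====
-- port of the helper get_letter_difference
def get_letter_difference (w1_counter w2_counter : PySem.Dict Char Int) : Int :=
  w1_counter.keys.foldl
    (fun total key => if w2_counter.contains key then total else total + w1_counter.getD key 0) 0

def anagram_difference (w1 : String) (w2 : String) : Int :=
  let w1_counter := PySem.Dict.counter w1.toList
  let w2_counter := PySem.Dict.counter w2.toList
  let total : Int := 0
  let total := total + get_letter_difference w1_counter w2_counter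
  let total := total + get_letter_difference w2_counter w1_counter
  w1_counter.keys.foldl
    (fun total key =>
      if w2_counter.contains key then
        total + |w1_counter.getD key 0 - w2_counter.getD key 0|
      else total) total

-- ===== PORT B =====
-- the while loop over indices i, j: the two list suffixes play the roles of the two pointers
def matchLoop : List Char → List Char → Int
  | [], _ => 0
  | _ :: _, [] => 0
  | a :: as, b :: bs =>
    if a = b then 1 + matchLoop as bs
    else if a < b then matchLoop as (b :: bs)
    else matchLoop (a :: as) bs
termination_by xs ys => xs.length + ys.length

def anagram_difference_alt (w1 : String) (w2 : String) : Int :=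
  let a := PySem.List.sorted w1.toList (fun x => x) false
  let b := PySem.List.sorted w2.toList (fun x => x) false
  (a.length : Int) + (b.length : Int) - 2 * matchLoop a b

-- ===== PRECONDITION & SPEC =====
def Spec_anagram_difference (w1 : String) (w2 : String) (out : Int) : Prop := out = anagram_difference_alt w1 w2
instance (w1 : String) (w2 : String) (out : Int) : Decidable (Spec_anagram_difference w1 w2 out) := by unfold Spec_anagram_difference; infer_instance

-- ===== CLAIM (what is proved, stated in full; the proofs are below) =====
def Claim_equal_anagram_difference : Prop := ∀ (w1 : String) (w2 : String), Dom_anagram_difference w1 w2 → Spec_anagram_difference w1 w2 (anagram_difference w1 w2)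

-- ===== LEMMAS AND PROOFS =====

-- a fold adding (if p k then g k else 0)-style terms is a sum over a map
theorem pv_foldl_if_add {α : Type} (l : List α) (p : α → Bool) (g : α → Int) (a : Int) :
    l.foldl (fun t k => if p k then t + g k else t) a
      = a + (l.map (fun k => if p k then g k else 0)).sum := by
  induction l generalizing a with
  | nil => simp
  | cons x xs ih => simp only [List.foldl_cons, List.map_cons, List.sum_cons, ih]; split <;> ring

theorem pv_foldl_if_add' {α : Type} (l : List α) (p : α → Bool) (g : α → Int) (a : Int) :
    l.foldl (fun t k => if p k then t else t + g k) a
      = a + (l.map (fun k => if p k then 0 else g k)).sum := by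
  induction l generalizing a with
  | nil => simp
  | cons x xs ih => simp only [List.foldl_cons, List.map_cons, List.sum_cons, ih]; split <;> ring

-- A's value as three sums over the distinct-letter lists
theorem pv_A_eq (w1 w2 : String) :
    anagram_difference w1 w2
      = ((PySem.Set.ofList w1.toList).map
          (fun k => if w2.toList.contains k then 0 else (w1.toList.count k : Int))).sum
      + ((PySem.Set.ofList w2.toList).map
          (fun k => if w1.toList.contains k then 0 else (w2.toList.count k : Int))).sum
      + ((PySem.Set.ofList w1.toList).map
          (fun k => if w2.toList.contains k then
              |(w1.toList.count k : Int) - (w2.toList.count k : Int)| else 0)).sum := by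
  unfold anagram_difference get_letter_difference
  simp only [PySem.Dict.keys_counter, PySem.Dict.contains_counter, PySem.Dict.getD_counter]
  rw [pv_foldl_if_add', pv_foldl_if_add', pv_foldl_if_add]
  ring

-- sum of an if-else-0 map is the sum over the filtered list
theorem pv_sum_ite_filter {α : Type} (l : List α) (p : α → Bool) (g : α → Int) :
    (l.map (fun k => if p k then g k else 0)).sum = ((l.filter p).map g).sum := by
  induction l with
  | nil => rfl
  | cons x xs ih =>
      by_cases h : p x <;> simp [h, ih]

-- A as two sums of positive surpluses
theorem pv_A_eq_max (w1 w2 : String) :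
    anagram_difference w1 w2
      = ((PySem.Set.ofList w1.toList).map
          (fun k => max 0 ((w1.toList.count k : Int) - (w2.toList.count k : Int)))).sum
      + ((PySem.Set.ofList w2.toList).map
          (fun k => max 0 ((w2.toList.count k : Int) - (w1.toList.count k : Int)))).sum := by
  rw [pv_A_eq]
  set xs := w1.toList with hxs
  set ys := w2.toList with hys
  set S1 := PySem.Set.ofList xs with hS1
  set S2 := PySem.Set.ofList ys with hS2
  have h1 : ∀ k ∈ S1,
      (if ys.contains k then 0 else (xs.count k : Int))
        + (if ys.contains k then |(xs.count k : Int) - (ys.count k : Int)| else 0)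
      = max 0 ((xs.count k : Int) - (ys.count k : Int))
        + (if ys.contains k then max 0 ((ys.count k : Int) - (xs.count k : Int)) else 0) := by
    intro k hk
    have hkx : k ∈ xs := (PySem.Set.mem_ofList xs k).mp hk
    by_cases hc : ys.contains k
    · simp only [hc, if_true]
      rcases le_total ((xs.count k : Int)) ((ys.count k : Int)) with h | h
      · rw [abs_of_nonpos (by omega), max_eq_left (by omega), max_eq_right (by omega)]; ring
      · rw [abs_of_nonneg (by omega), max_eq_right (by omega), max_eq_left (by omega)]; ring
    · have hky : k ∉ ys := fun h => hc (List.contains_iff_mem.mpr h)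
      have h0 : ys.count k = 0 := List.count_eq_zero.mpr hky
      have h1' : 0 < xs.count k := List.count_pos_iff.mpr hkx
      simp only [hc, if_false, Bool.false_eq_true]
      rw [h0, max_eq_right (by push_cast; omega)]
      push_cast; ring
  have h2 : ∀ k ∈ S2,
      max 0 ((ys.count k : Int) - (xs.count k : Int))
      = (if xs.contains k then 0 else (ys.count k : Int))
        + (if xs.contains k then max 0 ((ys.count k : Int) - (xs.count k : Int)) else 0) := by
    intro k hk
    have hky : k ∈ ys := (PySem.Set.mem_ofList ys k).mp hk
    by_cases hc : xs.contains k
    · simp only [hc, if_true]; ring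
    · have hkx : k ∉ xs := fun h => hc (List.contains_iff_mem.mpr h)
      have h0 : xs.count k = 0 := List.count_eq_zero.mpr hkx
      have h1' : 0 < ys.count k := List.count_pos_iff.mpr hky
      simp only [hc, if_false, Bool.false_eq_true]
      rw [h0, max_eq_right (by push_cast; omega)]
      push_cast; ring
  have e1 : ((S1.map (fun k => if ys.contains k then 0 else (xs.count k : Int))).sum
        + (S1.map (fun k => if ys.contains k then
            |(xs.count k : Int) - (ys.count k : Int)| else 0)).sum)
      = (S1.map (fun k => max 0 ((xs.count k : Int) - (ys.count k : Int)))).sum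
        + (S1.map (fun k => if ys.contains k then
            max 0 ((ys.count k : Int) - (xs.count k : Int)) else 0)).sum := by
    rw [← List.sum_map_add, ← List.sum_map_add]
    exact congrArg List.sum (List.map_congr_left h1)
  have e2 : (S2.map (fun k => max 0 ((ys.count k : Int) - (xs.count k : Int)))).sum
      = (S2.map (fun k => if xs.contains k then 0 else (ys.count k : Int))).sum
        + (S2.map (fun k => if xs.contains k then
            max 0 ((ys.count k : Int) - (xs.count k : Int)) else 0)).sum := by
    rw [← List.sum_map_add]
    exact congrArg List.sum (List.map_congr_left h2)
  have eperm : (S1.map (fun k => if ys.contains k then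
          max 0 ((ys.count k : Int) - (xs.count k : Int)) else 0)).sum
      = (S2.map (fun k => if xs.contains k then
          max 0 ((ys.count k : Int) - (xs.count k : Int)) else 0)).sum := by
    rw [pv_sum_ite_filter, pv_sum_ite_filter]
    have hperm : (S1.filter (fun k => ys.contains k)).Perm
        (S2.filter (fun k => xs.contains k)) := by
      rw [List.perm_ext_iff_of_nodup
        ((PySem.Set.nodup_ofList xs).filter _) ((PySem.Set.nodup_ofList ys).filter _)]
      intro a
      simp only [List.mem_filter, PySem.Set.mem_ofList, List.contains_iff_mem]
      tauto
    exact (hperm.map _).sum_eq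
  linarith [e1, e2, eperm]

-- a sum of multiset counts over a nodup list covering the support is the cardinality
theorem pv_sum_count_card (S : List Char) (m : Multiset Char) (hnd : S.Nodup)
    (hsupp : ∀ k, k ∈ m → k ∈ S) :
    (S.map (fun k => (m.count k : Int))).sum = (Multiset.card m : Int) := by
  have h1 : (S.map (fun k => (m.count k : Int))).sum
      = ((∑ k ∈ S.toFinset, m.count k : Nat) : Int) := by
    push_cast
    rw [Finset.sum_list_map_count]
    have : ∀ x ∈ S.toFinset, S.count x = 1 := fun x hx =>
      List.count_eq_one_of_mem hnd (List.mem_toFinset.mp hx)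
    rw [Finset.sum_congr rfl (fun x hx => by rw [this x hx, one_smul])]
  rw [h1]
  congr 1
  have hsub : m.toFinset ⊆ S.toFinset := by
    intro k hk
    exact List.mem_toFinset.mpr (hsupp k (Multiset.mem_toFinset.mp hk))
  rw [← Multiset.toFinset_sum_count_eq m]
  exact (Finset.sum_subset hsub (fun x _ hx =>
    Multiset.count_eq_zero.mpr (fun h => hx (Multiset.mem_toFinset.mpr h)))).symm

-- the positive surplus of counts is the count in the multiset difference
theorem pv_max_count_sub (xs ys : List Char) (k : Char) :
    max 0 ((xs.count k : Int) - (ys.count k : Int))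
      = (((↑xs : Multiset Char) - ↑ys).count k : Int) := by
  rw [Multiset.count_sub]
  simp only [Multiset.coe_count]
  omega

-- A equals the sum of the cardinalities of the two multiset differences
theorem pv_A_cards (w1 w2 : String) :
    anagram_difference w1 w2
      = (Multiset.card ((w1.toList : Multiset Char) - (w2.toList : Multiset Char)) : Int)
      + (Multiset.card ((w2.toList : Multiset Char) - (w1.toList : Multiset Char)) : Int) := by
  rw [pv_A_eq_max]
  congr 1
  · rw [← pv_sum_count_card (PySem.Set.ofList w1.toList) _ (PySem.Set.nodup_ofList w1.toList)]
    · exact congrArg List.sum (List.map_congr_left (fun k _ => pv_max_count_sub _ _ k))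
    · intro k hk
      rw [PySem.Set.mem_ofList]
      have := Multiset.mem_of_le (Multiset.sub_le_self _ _) hk
      simpa using this
  · rw [← pv_sum_count_card (PySem.Set.ofList w2.toList) _ (PySem.Set.nodup_ofList w2.toList)]
    · exact congrArg List.sum (List.map_congr_left (fun k _ => pv_max_count_sub _ _ k))
    · intro k hk
      rw [PySem.Set.mem_ofList]
      have := Multiset.mem_of_le (Multiset.sub_le_self _ _) hk
      simpa using this

-- B's value written out (the let-bindings of the port, unfolded)
theorem pv_B_val (w1 w2 : String) :
    anagram_difference_alt w1 w2
      = ((PySem.List.sorted w1.toList (fun x => x) false).length : Int)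
      + ((PySem.List.sorted w2.toList (fun x => x) false).length : Int)
      - 2 * matchLoop (PySem.List.sorted w1.toList (fun x => x) false)
            (PySem.List.sorted w2.toList (fun x => x) false) := rfl

-- the two-pointer merge on sorted lists counts the multiset intersection
theorem pv_matchLoop_eq (xs ys : List Char)
    (hx : xs.Pairwise (· ≤ ·)) (hy : ys.Pairwise (· ≤ ·)) :
    matchLoop xs ys = (Multiset.card ((↑xs : Multiset Char) ∩ ↑ys) : Int) := by
  induction xs, ys using matchLoop.induct with
  | case1 ys => simp [matchLoop]
  | case2 a as => simp [matchLoop]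
  | case3 as b bs ih =>
      have hx' : as.Pairwise (· ≤ ·) := hx.of_cons
      have hy' : bs.Pairwise (· ≤ ·) := hy.of_cons
      simp only [matchLoop]
      rw [ih hx' hy']
      have hms : (↑(b :: as) : Multiset Char) ∩ ↑(b :: bs)
          = b ::ₘ ((↑as : Multiset Char) ∩ ↑bs) := by
        ext k
        by_cases h : k = b
        · subst h
          simp only [Multiset.count_inter, Multiset.coe_count, List.count_cons_self,
            Multiset.count_cons_self]
          omega
        · simp [Multiset.coe_count, List.count_cons]
      rw [hms]
      simp only [Multiset.card_cons]
      push_cast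
      ring
  | case4 a as b bs hne hlt ih =>
      have hx' : as.Pairwise (· ≤ ·) := hx.of_cons
      simp only [matchLoop, if_neg hne, if_pos hlt]
      rw [ih hx' hy]
      have hnot : a ∉ (b :: bs) := by
        intro hmem
        rcases List.mem_cons.mp hmem with rfl | hmem
        · exact hne rfl
        · exact absurd hlt (not_lt.mpr (List.rel_of_pairwise_cons hy hmem))
      have h0 : (b :: bs).count a = 0 := List.count_eq_zero.mpr hnot
      have hms : (↑(a :: as) : Multiset Char) ∩ ↑(b :: bs)
          = (↑as : Multiset Char) ∩ ↑(b :: bs) := by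
        ext k
        by_cases h : k = a
        · subst h
          simp only [Multiset.count_inter, Multiset.coe_count, List.count_cons_self, h0]
          omega
        · have h' : a ≠ k := fun he => h he.symm
          simp [Multiset.coe_count, List.count_cons, h']
      rw [hms]
  | case5 a as b bs hne hnlt ih =>
      have hy' : bs.Pairwise (· ≤ ·) := hy.of_cons
      simp only [matchLoop, if_neg hne, if_neg hnlt]
      rw [ih hx hy']
      have hba : b < a := lt_of_le_of_ne (not_lt.mp hnlt) (fun he => hne he.symm)
      have hnot : b ∉ (a :: as) := by
        intro hmem
        rcases List.mem_cons.mp hmem with rfl | hmem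
        · exact hne rfl
        · exact absurd hba (not_lt.mpr (List.rel_of_pairwise_cons hx hmem))
      have h0 : (a :: as).count b = 0 := List.count_eq_zero.mpr hnot
      have hms : (↑(a :: as) : Multiset Char) ∩ ↑(b :: bs)
          = (↑(a :: as) : Multiset Char) ∩ ↑bs := by
        ext k
        by_cases h : k = b
        · subst h
          simp only [Multiset.count_inter, Multiset.coe_count, List.count_cons_self, h0]
          omega
        · have h' : b ≠ k := fun he => h he.symm
          simp [Multiset.coe_count, List.count_cons, h']
      rw [hms]

-- ===== VERDICT (by name: the statement is the Claim_ definition above) =====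
theorem anagram_difference_spec : Claim_equal_anagram_difference := by
  intro w1 w2 _
  unfold Spec_anagram_difference
  rw [pv_B_val, pv_A_cards]
  have hpx : (PySem.List.sorted w1.toList (fun x => x) false).Perm w1.toList :=
    PySem.List.sorted_perm w1.toList (fun x => x) false
  have hpy : (PySem.List.sorted w2.toList (fun x => x) false).Perm w2.toList :=
    PySem.List.sorted_perm w2.toList (fun x => x) false
  have hm : matchLoop (PySem.List.sorted w1.toList (fun x => x) false)
      (PySem.List.sorted w2.toList (fun x => x) false)
      = (Multiset.card ((↑w1.toList : Multiset Char) ∩ ↑w2.toList) : Int) := by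
    rw [pv_matchLoop_eq _ _ (PySem.List.sorted_pairwise w1.toList (fun x => x))
      (PySem.List.sorted_pairwise w2.toList (fun x => x))]
    rw [show ((PySem.List.sorted w1.toList (fun x => x) false : List Char) : Multiset Char)
        = (w1.toList : Multiset Char) from Quot.sound hpx,
      show ((PySem.List.sorted w2.toList (fun x => x) false : List Char) : Multiset Char)
        = (w2.toList : Multiset Char) from Quot.sound hpy]
  rw [hm, hpx.length_eq, hpy.length_eq]
  have key : ∀ s t : Multiset Char,
      (Multiset.card (s - t) : Int) = (Multiset.card s : Int) - Multiset.card (s ∩ t) := by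
    intro s t
    have h1 : s - t = s - (s ∩ t) := by
      ext k
      simp only [Multiset.count_sub, Multiset.count_inter]
      omega
    have h2 : Multiset.card (s - (s ∩ t)) = Multiset.card s - Multiset.card (s ∩ t) :=
      Multiset.card_sub (Multiset.inter_le_left)
    have h3 : Multiset.card (s ∩ t) ≤ Multiset.card s :=
      Multiset.card_le_card (Multiset.inter_le_left)
    rw [h1, h2]
    omega
  have hic : ((↑w2.toList : Multiset Char) ∩ ↑w1.toList)
      = ((↑w1.toList : Multiset Char) ∩ ↑w2.toList) := Multiset.inter_comm _ _
  rw [key, key, hic]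
  simp only [Multiset.coe_card]
  ring
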